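-- pv_equiv track=rewrite | github.com/IsmoilovMuhriddin/AoC | 2024/2/second.py | check_if_safeable
-- ===== SOURCE A (Python) =====
-- def is_safe_numbers(arr):
--     # do it in one go, no need to check twice.
--     inc = 1
--     dec = 1
--
--     for i in range(1, len(arr)):
--         if arr[i] > arr[i - 1]:
--             inc += 1
--             if arr[i] - arr[i - 1] > 3:
--                 return False
--         if arr[i] < arr[i - 1]:
--             dec += 1
--             if arr[i - 1] - arr[i] > 3:
--                 return False
--         if arr[i] == arr[i - 1]:
--             return False
--     return inc == len(arr) or dec == len(arr)
--
-- def check_if_safeable(arr):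
--     res = is_safe_numbers(arr)
--     if res:
--         return 1
--     for i in range(len(arr)):
--         res = is_safe_numbers(arr[:i] + arr[i + 1 :])
--         if res:
--             return 1
--     return 0
-- ===== SOURCE B (Python) =====
-- def check_if_safeable(arr):
--     # One linear scan per direction: find the first adjacent pair violating the
--     # direction; only removing one endpoint of that pair can help, so test just
--     # those two candidate removals.
--     if not arr:
--         return 0
--     def first_bad(ok):
--         for i in range(1, len(arr)):
--             if not ok(arr[i - 1], arr[i]):
--                 return i
--         return None
--     def ok_without(ok, j):
--         vals = [v for k, v in enumerate(arr) if k != j]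
--         return all(ok(vals[k - 1], vals[k]) for k in range(1, len(vals)))
--     for ok in (lambda a, b: 0 < b - a <= 3, lambda a, b: 0 < a - b <= 3):
--         f = first_bad(ok)
--         if f is None or ok_without(ok, f - 1) or ok_without(ok, f):
--             return 1
--     return 0
-- ===== Notes on version B (the rewrite author's own statement) =====
-- stated objective: faster
-- what changed: B replaces A's quadratic try-every-removal loop by one linear scan per direction that finds the first violating adjacent pair and tests only the two removals touching that pair.
import Mathlib
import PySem

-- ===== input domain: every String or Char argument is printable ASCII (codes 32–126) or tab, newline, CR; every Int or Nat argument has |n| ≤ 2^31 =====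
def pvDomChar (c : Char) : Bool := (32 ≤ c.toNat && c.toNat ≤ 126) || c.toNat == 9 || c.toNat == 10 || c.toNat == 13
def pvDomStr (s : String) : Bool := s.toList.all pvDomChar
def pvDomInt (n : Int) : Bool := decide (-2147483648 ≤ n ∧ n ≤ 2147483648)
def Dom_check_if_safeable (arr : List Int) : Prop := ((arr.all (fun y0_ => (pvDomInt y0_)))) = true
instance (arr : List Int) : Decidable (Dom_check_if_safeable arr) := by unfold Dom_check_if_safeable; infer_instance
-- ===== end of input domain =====

-- B replaces A's quadratic try-every-removal search by one linear scan per direction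
-- that tests only the two removals touching the first violating adjacent pair (objective: faster).


-- ===== PORT A =====
-- the 'for i in range(1, len(arr))' loop of is_safe_numbers: prev = arr[i-1], state (inc, dec),
-- early 'return False' = returning false; at the end 'inc == len(arr) or dec == len(arr)'
def isSafeAux (n : Int) (prev inc dec : Int) : List Int → Bool
  | [] => decide (inc = n) || decide (dec = n)
  | x :: xs =>
    let inc' := if prev < x then inc + 1 else inc
    if prev < x ∧ 3 < x - prev then false
    else
      let dec' := if x < prev then dec + 1 else dec
      if x < prev ∧ 3 < prev - x then false
      else if x = prev then false
      else isSafeAux n x inc' dec' xs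

def is_safe_numbers (arr : List Int) : Bool :=
  match arr with
  | [] => false   -- loop body never runs; inc = dec = 1 ≠ 0 = len(arr)
  | a :: rest => isSafeAux ((rest.length : Int) + 1) a 1 1 rest

-- 'for i in range(len(arr)): if is_safe_numbers(arr[:i] + arr[i+1:]): return 1' then 'return 0'
def removalLoop (arr : List Int) : List Int → Int
  | [] => 0
  | i :: is =>
    if is_safe_numbers (PySem.List.slice arr (some 0) (some i) ++
                        PySem.List.slice arr (some (i + 1)) none) then 1
    else removalLoop arr is

def check_if_safeable (arr : List Int) : Int :=
  if is_safe_numbers arr then 1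
  else removalLoop arr (PySem.List.pyRange 0 (arr.length : Int) 1)

-- ===== PORT B =====
def okInc (p x : Int) : Bool := decide (0 < x - p ∧ x - p ≤ 3)
def okDec (p x : Int) : Bool := decide (0 < p - x ∧ p - x ≤ 3)

-- B's first_bad: index of the first adjacent pair violating ok, scanning once
def firstBad (ok : Int → Int → Bool) (prev : Int) (i : Nat) : List Int → Option Nat
  | [] => none
  | x :: xs => if ok prev x then firstBad ok x (i + 1) xs else some i

-- B's all(ok(vals[k-1], vals[k]) ...)
def allOk (ok : Int → Int → Bool) (prev : Int) : List Int → Bool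
  | [] => true
  | x :: xs => ok prev x && allOk ok x xs

-- B's ok_without: vals = arr with index j removed (the comprehension is exactly eraseIdx j)
def okWithout (ok : Int → Int → Bool) (arr : List Int) (j : Nat) : Bool :=
  match arr.eraseIdx j with
  | [] => true
  | v :: vs => allOk ok v vs

def tryDir (ok : Int → Int → Bool) (arr : List Int) (a : Int) (rest : List Int) : Bool :=
  match firstBad ok a 1 rest with
  | none => true
  | some f => okWithout ok arr (f - 1) || okWithout ok arr f

def check_if_safeable_alt (arr : List Int) : Int :=
  match arr with
  | [] => 0
  | a :: rest =>
    if tryDir okInc (a :: rest) a rest || tryDir okDec (a :: rest) a rest then 1 else 0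

-- ===== PRECONDITION & SPEC =====
def Spec_check_if_safeable (arr : List Int) (out : Int) : Prop := out = check_if_safeable_alt arr
instance (arr : List Int) (out : Int) : Decidable (Spec_check_if_safeable arr out) := by unfold Spec_check_if_safeable; infer_instance

-- ===== CLAIM (what is proved, stated in full; the proofs are below) =====
def Claim_equal_check_if_safeable : Prop := ∀ (arr : List Int), Dom_check_if_safeable arr → Spec_check_if_safeable arr (check_if_safeable arr)

-- ===== LEMMAS AND PROOFS =====

-- chain predicate on a whole list (head + allOk)
def chainOk (ok : Int → Int → Bool) : List Int → Bool
  | [] => true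
  | a :: rest => allOk ok a rest

-- step counters matching A's inc/dec counters
def ups : Int → List Int → Int
  | _, [] => 0
  | p, x :: xs => (if p < x then 1 else 0) + ups x xs

def downs : Int → List Int → Int
  | _, [] => 0
  | p, x :: xs => (if x < p then 1 else 0) + downs x xs

def noBad : Int → List Int → Bool
  | _, [] => true
  | p, x :: xs => (decide (x ≠ p) && decide (x - p ≤ 3) && decide (p - x ≤ 3)) && noBad x xs

lemma isSafeAux_eq (xs : List Int) : ∀ (prev inc dec n : Int),
    isSafeAux n prev inc dec xs =
      (noBad prev xs && (decide (inc + ups prev xs = n) || decide (dec + downs prev xs = n))) := by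
  induction xs with
  | nil => intro p inc dec n; simp [isSafeAux, ups, downs, noBad]
  | cons x xs ih =>
    intro p inc dec n
    simp only [isSafeAux, ups, downs, noBad]
    by_cases h1 : p < x ∧ 3 < x - p
    · simp [h1, show ¬ (x - p ≤ 3) by omega]
    · by_cases h2 : x < p ∧ 3 < p - x
      · simp [h1, h2, show ¬ (p - x ≤ 3) by omega]
      · by_cases h3 : x = p
        · simp [h3]
        · simp only [h1, h2, h3, if_false]
          rw [ih]
          have hne : (decide (x ≠ p)) = true := by simp [h3]
          have hle1 : (decide (x - p ≤ 3)) = true := by simp; omega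
          have hle2 : (decide (p - x ≤ 3)) = true := by simp; omega
          simp only [hne, hle1, hle2, Bool.true_and]
          congr 1
          congr 1 <;> rw [decide_eq_decide] <;> by_cases hpx : p < x <;>
            by_cases hxp : x < p <;> simp [hpx, hxp] <;> omega

lemma ups_le (xs : List Int) : ∀ p, ups p xs ≤ (xs.length : Int) ∧ 0 ≤ ups p xs := by
  induction xs with
  | nil => intro p; simp [ups]
  | cons x xs ih =>
    intro p
    have := ih x
    simp only [ups, List.length_cons]
    split_ifs <;> push_cast <;> omega

lemma downs_le (xs : List Int) : ∀ p, downs p xs ≤ (xs.length : Int) ∧ 0 ≤ downs p xs := by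
  induction xs with
  | nil => intro p; simp [downs]
  | cons x xs ih =>
    intro p
    have := ih x
    simp only [downs, List.length_cons]
    split_ifs <;> push_cast <;> omega

lemma allOk_inc_iff (xs : List Int) : ∀ p,
    allOk okInc p xs = (noBad p xs && decide (ups p xs = (xs.length : Int))) := by
  induction xs with
  | nil => intro p; simp [allOk, noBad, ups]
  | cons x xs ih =>
    intro p
    have hb := ups_le xs x
    rw [Bool.eq_iff_iff]
    simp only [allOk, ih, okInc, noBad, ups, List.length_cons, Bool.and_eq_true,
      decide_eq_true_eq]
    by_cases hpx : p < x <;> simp [hpx]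
    · constructor
      · rintro ⟨h1, hn, hu⟩
        exact ⟨⟨⟨⟨by omega, by omega⟩, by omega⟩, hn⟩, by omega⟩
      · rintro ⟨⟨⟨⟨hA, hB⟩, hC⟩, hD⟩, hE⟩
        exact ⟨by omega, hD, by omega⟩
    · intro h1 h2 h3 h4
      omega

lemma allOk_dec_iff (xs : List Int) : ∀ p,
    allOk okDec p xs = (noBad p xs && decide (downs p xs = (xs.length : Int))) := by
  induction xs with
  | nil => intro p; simp [allOk, noBad, downs]
  | cons x xs ih =>
    intro p
    have hb := downs_le xs x
    rw [Bool.eq_iff_iff]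
    simp only [allOk, ih, okDec, noBad, downs, List.length_cons, Bool.and_eq_true,
      decide_eq_true_eq]
    by_cases hpx : x < p <;> simp [hpx]
    · constructor
      · rintro ⟨h1, hn, hu⟩
        exact ⟨⟨⟨⟨by omega, by omega⟩, by omega⟩, hn⟩, by omega⟩
      · rintro ⟨⟨⟨⟨hA, hB⟩, hC⟩, hD⟩, hE⟩
        exact ⟨by omega, hD, by omega⟩
    · intro h1 h2 h3 h4
      omega

lemma is_safe_iff (a : Int) (rest : List Int) :
    is_safe_numbers (a :: rest) = (allOk okInc a rest || allOk okDec a rest) := by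
  rw [is_safe_numbers, isSafeAux_eq, allOk_inc_iff, allOk_dec_iff, Bool.and_or_distrib_left]
  congr 2 <;> rw [decide_eq_decide] <;> omega

-- a chain containing a bad adjacent pair is not ok
lemma allOk_append_pair (ok : Int → Int → Bool) (u v : Int) (l2 : List Int) :
    ∀ (l1 : List Int) (p : Int), allOk ok p (l1 ++ u :: v :: l2) = true → ok u v = true := by
  intro l1
  induction l1 with
  | nil => intro p h; simp [allOk] at h; tauto
  | cons a t ih =>
    intro p h
    simp only [List.cons_append, allOk, Bool.and_eq_true] at h
    exact ih a h.2

lemma chainOk_append_pair (ok : Int → Int → Bool) (u v : Int) (l1 l2 : List Int)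
    (h : chainOk ok (l1 ++ u :: v :: l2) = true) : ok u v = true := by
  cases l1 with
  | nil => simp only [List.nil_append, chainOk, allOk, Bool.and_eq_true] at h; exact h.1
  | cons b t => exact allOk_append_pair ok u v l2 t b h

lemma okWithout_eq (ok : Int → Int → Bool) (arr : List Int) (j : Nat) :
    okWithout ok arr j = chainOk ok (arr.eraseIdx j) := by
  cases h : arr.eraseIdx j <;> simp [okWithout, chainOk, h]

lemma firstBad_none_iff (ok : Int → Int → Bool) (xs : List Int) : ∀ p i,
    firstBad ok p i xs = none ↔ allOk ok p xs = true := by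
  induction xs with
  | nil => intro p i; simp [firstBad, allOk]
  | cons x xs ih =>
    intro p i
    by_cases hk : ok p x <;> simp [firstBad, allOk, hk, ih]

-- decomposition at the first bad pair
lemma firstBad_some_decomp (ok : Int → Int → Bool) (xs : List Int) : ∀ (p : Int) (i f : Nat),
    firstBad ok p i xs = some f →
    ∃ l1 u v l2, p :: xs = l1 ++ u :: v :: l2 ∧ l1.length + i = f ∧ ok u v = false := by
  induction xs with
  | nil => intro p i f h; simp [firstBad] at h
  | cons x xs ih =>
    intro p i f h
    by_cases hk : ok p x
    · rw [firstBad, if_pos hk] at h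
      obtain ⟨l1, u, v, l2, hdec, hlen, hbad⟩ := ih x (i + 1) f h
      exact ⟨p :: l1, u, v, l2, by rw [List.cons_append, ← hdec], by simp; omega, hbad⟩
    · rw [firstBad, if_neg hk] at h
      obtain rfl : i = f := by injection h
      exact ⟨[], p, x, xs, rfl, by simp, by simp [hk]⟩

-- only removing an endpoint of the first bad pair can repair the chain
lemma tryDir_iff (ok : Int → Int → Bool) (a : Int) (rest : List Int) :
    tryDir ok (a :: rest) a rest = true ↔
      (chainOk ok (a :: rest) = true ∨
        ∃ j < (a :: rest).length, (a :: rest).eraseIdx j ≠ [] ∧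
          chainOk ok ((a :: rest).eraseIdx j) = true) := by
  rcases h : firstBad ok a 1 rest with _ | f
  · simp only [tryDir, h]
    constructor
    · intro _
      exact Or.inl ((firstBad_none_iff ok rest a 1).mp h)
    · intro _; trivial
  · obtain ⟨l1, u, v, l2, hdec, hlen, hbad⟩ := firstBad_some_decomp ok rest a 1 f h
    have hpairfalse : ∀ l1' l2' : List Int, chainOk ok (l1' ++ u :: v :: l2') ≠ true := by
      intro l1' l2' hc
      have := chainOk_append_pair ok u v l1' l2' hc
      rw [hbad] at this
      exact Bool.false_ne_true this
    have hchain : chainOk ok (a :: rest) ≠ true := by rw [hdec]; exact hpairfalse l1 l2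
    have e1 : (a :: rest).eraseIdx (f - 1) = l1 ++ v :: l2 := by
      rw [hdec, show f - 1 = l1.length by omega,
        List.eraseIdx_append_of_length_le (le_refl _)]
      simp
    have e2 : (a :: rest).eraseIdx f = l1 ++ u :: l2 := by
      rw [hdec, show f = l1.length + 1 by omega,
        List.eraseIdx_append_of_length_le (by omega)]
      simp
    have hlenarr : (a :: rest).length = l1.length + 2 + l2.length := by
      rw [hdec]; simp; omega
    simp only [tryDir, h, Bool.or_eq_true, okWithout_eq]
    constructor
    · rintro (hc | hc)
      · exact Or.inr ⟨f - 1, by omega, by rw [e1]; simp, hc⟩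
      · exact Or.inr ⟨f, by omega, by rw [e2]; simp, hc⟩
    · rintro (hc | ⟨j, hj, hne, hcj⟩)
      · exact absurd hc hchain
      · rcases show j = f - 1 ∨ j = f ∨ j < l1.length ∨ l1.length + 2 ≤ j by omega
          with rfl | rfl | hlt | hge
        · exact Or.inl hcj
        · exact Or.inr hcj
        · rw [hdec, List.eraseIdx_append_of_lt_length hlt] at hcj
          exact absurd hcj (hpairfalse _ _)
        · rw [hdec, show l1 ++ u :: v :: l2 = (l1 ++ [u, v]) ++ l2 by simp,
            List.eraseIdx_append_of_length_le (by simp; omega)] at hcj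
          rw [show (l1 ++ [u, v]) ++ l2.eraseIdx (j - (l1 ++ [u, v]).length)
              = l1 ++ u :: v :: l2.eraseIdx (j - (l1 ++ [u, v]).length) by simp] at hcj
          exact absurd hcj (hpairfalse _ _)

lemma removalLoop_one_iff (arr : List Int) : ∀ l,
    (removalLoop arr l = 1 ↔ ∃ i ∈ l,
      is_safe_numbers (PySem.List.slice arr (some 0) (some i) ++
        PySem.List.slice arr (some (i + 1)) none) = true) ∧
    (removalLoop arr l = 0 ∨ removalLoop arr l = 1) := by
  intro l
  induction l with
  | nil => simp [removalLoop]
  | cons i is ih =>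
    by_cases hs : is_safe_numbers (PySem.List.slice arr (some 0) (some i) ++
        PySem.List.slice arr (some (i + 1)) none) = true
    · refine ⟨⟨fun _ => ⟨i, by simp, hs⟩, fun _ => ?_⟩, Or.inr ?_⟩ <;>
        rw [removalLoop, if_pos hs]
    · simp only [removalLoop, if_neg hs]
      refine ⟨?_, ih.2⟩
      rw [ih.1]
      simp only [List.mem_cons]
      constructor
      · rintro ⟨x, hx, hsx⟩; exact ⟨x, Or.inr hx, hsx⟩
      · rintro ⟨x, hx | hx, hsx⟩
        · exact absurd (hx ▸ hsx) hs
        · exact ⟨x, hx, hsx⟩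

lemma slice_erase (arr : List Int) (k : Nat) :
    PySem.List.slice arr (some (k : Int)) none = arr.drop k ∧
    PySem.List.slice arr (some 0) (some (k : Int)) = arr.take k := by
  constructor
  · exact PySem.List.slice_from_natCast arr k
  · rw [PySem.List.slice_zero_start, PySem.List.slice_to_natCast]

lemma is_safe_iff' (l : List Int) :
    is_safe_numbers l = true ↔ l ≠ [] ∧ (chainOk okInc l = true ∨ chainOk okDec l = true) := by
  cases l with
  | nil => simp [is_safe_numbers]
  | cons a rest => rw [is_safe_iff]; simp [chainOk]

lemma A_one_iff (a : Int) (rest : List Int) :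
    check_if_safeable (a :: rest) = 1 ↔
      ((chainOk okInc (a :: rest) = true ∨ chainOk okDec (a :: rest) = true) ∨
        ∃ j < (a :: rest).length, (a :: rest).eraseIdx j ≠ [] ∧
          (chainOk okInc ((a :: rest).eraseIdx j) = true ∨
            chainOk okDec ((a :: rest).eraseIdx j) = true)) := by
  unfold check_if_safeable
  by_cases hs : is_safe_numbers (a :: rest) = true
  · simp only [hs, if_true]
    simp only [true_iff]
    exact Or.inl ((is_safe_iff' _).mp hs).2
  · rw [if_neg hs, (removalLoop_one_iff _ _).1]
    constructor
    · rintro ⟨i, hi, hsi⟩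
      obtain ⟨h0, hn⟩ := (PySem.List.mem_pyRange_one).mp hi
      have hk : i = ((i.toNat : Nat) : Int) := by omega
      rw [hk, (slice_erase _ _).2, show (((i.toNat : Nat) : Int) + 1) = ((i.toNat + 1 : Nat) : Int) by push_cast; ring,
        (slice_erase _ _).1, ← List.eraseIdx_eq_take_drop_succ] at hsi
      obtain ⟨hne, hch⟩ := (is_safe_iff' _).mp hsi
      exact Or.inr ⟨i.toNat, by omega, hne, hch⟩
    · rintro (hch | ⟨j, hj, hne, hch⟩)
      · exact absurd ((is_safe_iff' _).mpr ⟨by simp, hch⟩) hs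
      · refine ⟨(j : Int), PySem.List.mem_pyRange_one.mpr ⟨by omega, by omega⟩, ?_⟩
        rw [(slice_erase _ _).2, show ((j : Int) + 1) = ((j + 1 : Nat) : Int) by push_cast; ring,
          (slice_erase _ _).1, ← List.eraseIdx_eq_take_drop_succ]
        exact (is_safe_iff' _).mpr ⟨hne, hch⟩

lemma A_zero_or_one (arr : List Int) :
    check_if_safeable arr = 0 ∨ check_if_safeable arr = 1 := by
  unfold check_if_safeable
  split_ifs with hs
  · exact Or.inr rfl
  · exact (removalLoop_one_iff _ _).2

-- ===== VERDICT (by name: the statement is the Claim_ definition above) =====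
theorem check_if_safeable_spec : Claim_equal_check_if_safeable := by
  intro arr _
  unfold Spec_check_if_safeable
  cases arr with
  | nil => rfl
  | cons a rest =>
    have hPB : (tryDir okInc (a :: rest) a rest || tryDir okDec (a :: rest) a rest) = true ↔
        ((chainOk okInc (a :: rest) = true ∨ chainOk okDec (a :: rest) = true) ∨
          ∃ j < (a :: rest).length, (a :: rest).eraseIdx j ≠ [] ∧
            (chainOk okInc ((a :: rest).eraseIdx j) = true ∨
              chainOk okDec ((a :: rest).eraseIdx j) = true)) := by
      rw [Bool.or_eq_true, tryDir_iff, tryDir_iff]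
      constructor
      · rintro ((h | ⟨j, hj, hne, hc⟩) | (h | ⟨j, hj, hne, hc⟩))
        exacts [Or.inl (Or.inl h), Or.inr ⟨j, hj, hne, Or.inl hc⟩,
          Or.inl (Or.inr h), Or.inr ⟨j, hj, hne, Or.inr hc⟩]
      · rintro ((h | h) | ⟨j, hj, hne, (hc | hc)⟩)
        exacts [Or.inl (Or.inl h), Or.inr (Or.inl h),
          Or.inl (Or.inr ⟨j, hj, hne, hc⟩), Or.inr (Or.inr ⟨j, hj, hne, hc⟩)]
    simp only [check_if_safeable_alt]
    by_cases hb : (tryDir okInc (a :: rest) a rest || tryDir okDec (a :: rest) a rest) = true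
    · rw [if_pos hb]
      exact (A_one_iff a rest).mpr (hPB.mp hb)
    · rw [if_neg hb]
      rcases A_zero_or_one (a :: rest) with h0 | h1
      · exact h0
      · exact absurd (hPB.mpr ((A_one_iff a rest).mp h1)) hb
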